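-- pv_equiv track=rewrite | github.com/rcamba/util | resources/testDir/convertTagFileToNewFormat.py | findTag
-- ===== SOURCE A (Python) =====
-- def findTag(line):
-- 	tag=""
-- 	for c in line:
-- 		if c!='\"':
-- 			tag=tag+c
-- 		else:
-- 			break
-- 	return tag[:-1]
-- ===== SOURCE B (Python) =====
-- def findTag(line):
--     i = line.find('"')
--     prefix = line if i < 0 else line[:i]
--     return prefix[:-1]
-- ===== Notes on version B (the rewrite author's own statement) =====
-- stated objective: faster
-- what changed: Replaces the Python-level character-by-character accumulation loop (with quadratic string concatenation) by a single C-level str.find for the first quote plus a prefix slice and [:-1], keeping the whole line when no quote exists.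
import Mathlib
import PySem

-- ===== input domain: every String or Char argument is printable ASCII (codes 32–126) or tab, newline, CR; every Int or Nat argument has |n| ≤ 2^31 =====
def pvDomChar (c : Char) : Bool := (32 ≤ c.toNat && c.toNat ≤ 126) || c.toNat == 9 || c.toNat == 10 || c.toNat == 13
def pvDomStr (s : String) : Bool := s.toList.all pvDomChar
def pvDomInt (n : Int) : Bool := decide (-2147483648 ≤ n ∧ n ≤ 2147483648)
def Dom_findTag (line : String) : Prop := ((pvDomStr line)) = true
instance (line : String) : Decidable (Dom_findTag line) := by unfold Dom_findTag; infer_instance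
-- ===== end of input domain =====

-- B replaces A's char-accumulation loop with a find-the-first-quote + prefix-slice (idiomatic; return value only).

-- ===== PORT A =====
-- the 'for c in line: if c != '"' accumulate else break' loop
def findTagLoop (tag : String) : List Char → String
  | [] => tag
  | c :: cs => if c ≠ '"' then findTagLoop (tag.push c) cs else tag

def findTag (line : String) : String :=
  PySem.Str.slice (findTagLoop "" line.toList) none (some (-1))   -- tag[:-1]

-- ===== PORT B =====
def findTag_alt (line : String) : String :=
  let i := PySem.Str.find line "\""
  let pre := if i < 0 then line else PySem.Str.slice line none (some i)
  PySem.Str.slice pre none (some (-1))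

-- ===== PRECONDITION & SPEC =====
def Spec_findTag (line : String) (out : String) : Prop := out = findTag_alt line
instance (line : String) (out : String) : Decidable (Spec_findTag line out) := by unfold Spec_findTag; infer_instance

-- ===== CLAIM (what is proved, stated in full; the proofs are below) =====
def Claim_equal_findTag : Prop := ∀ (line : String), Dom_findTag line → Spec_findTag line (findTag line)

-- ===== LEMMAS AND PROOFS =====

-- A's loop builds exactly the takeWhile-prefix before the first quote
theorem findTagLoop_toList (l : List Char) : ∀ (tag : String),
    (findTagLoop tag l).toList = tag.toList ++ l.takeWhile (fun c => c ≠ '"') := by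
  induction l with
  | nil => intro tag; simp [findTagLoop]
  | cons c cs ih =>
    intro tag
    by_cases hc : c = '"'
    · simp [findTagLoop, hc, List.takeWhile_cons]
    · simp [findTagLoop, hc, List.takeWhile_cons, ih]

theorem takeWhile_of_not_mem (l : List Char) (h : '"' ∉ l) :
    l.takeWhile (fun c => c ≠ '"') = l := by
  induction l with
  | nil => rfl
  | cons c cs ih =>
    simp only [List.mem_cons, not_or] at h
    rw [List.takeWhile_cons_of_pos (by simp; exact fun hcq => h.1 hcq.symm), ih h.2]

theorem takeWhile_eq_take (l : List Char) : ∀ (n : Nat),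
    ['"'] <+: l.drop n → (∀ i < n, ¬ ['"'] <+: l.drop i) →
    l.takeWhile (fun c => c ≠ '"') = l.take n := by
  induction l with
  | nil => intro n h _; simp at h
  | cons c cs ih =>
    intro n h hlt
    cases n with
    | zero =>
      simp only [List.drop_zero] at h
      obtain ⟨hc, -⟩ := List.cons_prefix_cons.mp h
      subst hc
      simp
    | succ m =>
      have hc : c ≠ '"' := by
        intro hcq
        exact hlt 0 (Nat.succ_pos m) (by simp [hcq])
      have hdrop : ['"'] <+: cs.drop m := by simpa using h
      have hlt' : ∀ i < m, ¬ ['"'] <+: cs.drop i := by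
        intro i hi
        have := hlt (i + 1) (by omega)
        simpa using this
      rw [List.takeWhile_cons_of_pos (by simp [hc]), ih m hdrop hlt', List.take_succ_cons]

theorem singleton_infix_iff_mem (a : Char) (l : List Char) : [a] <:+: l ↔ a ∈ l := by
  constructor
  · intro h; exact (List.singleton_sublist).mp h.sublist
  · intro h
    obtain ⟨s, t, rfl⟩ := List.append_of_mem h
    exact ⟨s, t, by simp⟩

-- ===== VERDICT (by name: the statement is the Claim_ definition above) =====
theorem findTag_spec : Claim_equal_findTag := by
  intro line _
  unfold Spec_findTag findTag findTag_alt
  have hq : ("\"" : String).toList = ['"'] := by decide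
  simp only [PySem.Str.find_eq, hq]
  set l := line.toList with hl
  set i := PySem.Chars.find l ['"'] with hi
  by_cases hneg : i < 0
  · -- no quote in the line
    have hi1 : i = -1 := by
      have := PySem.Chars.neg_one_le_find l ['"']
      omega
    have hnotin : '"' ∉ l := by
      intro hmem
      exact ((PySem.Chars.find_eq_neg_one_iff l ['"']).mp (hi ▸ hi1))
        ((singleton_infix_iff_mem _ _).mpr hmem)
    simp only [if_pos hneg, PySem.Str.slice,
      findTagLoop_toList, takeWhile_of_not_mem l hnotin]
    simp [← hl]
  · -- quote found at index i ≥ 0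
    have hpos : 0 ≤ i := by omega
    obtain ⟨hpre, hmin⟩ := PySem.Chars.find_spec (s := l) (sub := ['"']) hpos
    have htw : l.takeWhile (fun c => c ≠ '"') = l.take i.toNat :=
      takeWhile_eq_take l i.toNat hpre hmin
    simp only [if_neg hneg, PySem.Str.slice, String.toList_ofList, findTagLoop_toList, htw]
    rw [show PySem.Chars.slice line.toList none (some i) = List.take i.toNat line.toList from
      PySem.List.slice_to _ hpos]
    simp [← hl]
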